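-- pv_equiv track=rewrite | github.com/abrarShariar/Algorithm-problem-solving | algoexpert/coding-problems/rakuten/test.py | solution
-- ===== SOURCE A (Python) =====
-- def solution(A):
--     # write your code in Python 3.6
--     binarian_A = 0
--     for i in range(len(A)):
--         binarian_A += pow2(A[i])
--
--     result_list = []
--     while binarian_A > 0:
--         # find the closest pow
--         start_index_pow2 = 0
--         closest_pow2 = pow2(start_index_pow2)
--         while closest_pow2 <= binarian_A:
--             start_index_pow2 += 1
--             closest_pow2 = pow2(start_index_pow2)
--
--         result_list.append(start_index_pow2 - 1)
--         binarian_A = binarian_A - pow2(start_index_pow2 - 1)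
--
--     return len(result_list)
--
-- def pow2(k):
--     result = 1
--     for i in range(k):
--         result = result * 2
--
--     return int(result)
-- ===== SOURCE B (Python) =====
-- def solution(A):
--     s = 0
--     for a in A:
--         s += 1 << a
--     return bin(s).count('1')
-- ===== Notes on version B (the rewrite author's own statement) =====
-- stated objective: simpler
-- what changed: B builds the sum with bit-shifts and counts the ones of its binary representation directly, replacing A's doubling-loop pow2 and its greedy repeated search-and-subtract of the closest power of two.
-- outside the precondition, e.g. on solution([-1]): A returns 1, B raises ValueError
import Mathlib
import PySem

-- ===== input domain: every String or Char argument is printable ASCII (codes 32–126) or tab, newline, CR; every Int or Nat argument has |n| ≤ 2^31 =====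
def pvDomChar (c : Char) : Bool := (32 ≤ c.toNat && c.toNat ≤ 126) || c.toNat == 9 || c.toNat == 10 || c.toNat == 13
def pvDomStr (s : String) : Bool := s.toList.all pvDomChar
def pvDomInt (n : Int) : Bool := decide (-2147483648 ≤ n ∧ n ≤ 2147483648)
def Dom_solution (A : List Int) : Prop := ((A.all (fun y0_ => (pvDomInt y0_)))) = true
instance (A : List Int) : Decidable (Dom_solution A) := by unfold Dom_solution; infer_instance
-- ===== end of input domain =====

-- B replaces A's doubling-loop pow2 and its greedy search-and-subtract of the closest
-- power of two by a shift-built sum whose binary ones are counted directly (simpler).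

-- ===== PORT A =====
-- pow2(k): result = 1; for i in range(k): result *= 2
def pow2 (k : Int) : Int := (PySem.List.pyRange 0 k 1).foldl (fun r _ => r * 2) 1

theorem foldl_double {α : Type} : ∀ (l : List α) (c : Int),
    l.foldl (fun r _ => r * 2) c = c * 2 ^ l.length
  | [], c => by simp
  | x :: xs, c => by
    simp only [List.foldl_cons, List.length_cons, foldl_double xs (c * 2)]
    ring

-- termination helper for the inner while-loop below (cited in decreasing_by)
theorem pow2_natCast (n : Nat) : pow2 (n : Int) = 2 ^ n := by
  unfold pow2
  rw [foldl_double]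
  simp [PySem.List.length_pyRange_one]

-- start_index_pow2 = 0; closest_pow2 = pow2(0); while closest_pow2 <= b: i += 1; recompute
def findIdx (b : Int) (i : Nat) : Nat :=
  if pow2 (i : Int) ≤ b then findIdx b (i + 1) else i
termination_by b.toNat + 1 - i
decreasing_by
  rename_i h
  rw [pow2_natCast] at h
  have h1 : (i : Int) < 2 ^ i := by exact_mod_cast Nat.lt_two_pow_self
  omega

-- characterisation of the inner loop, needed for outerLoop's termination
theorem findIdx_spec (b : Int) (i : Nat) :
    b < 2 ^ (findIdx b i) ∧ (findIdx b i = i ∨ (2:Int) ^ (findIdx b i - 1) ≤ b) := by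
  fun_induction findIdx b i with
  | case1 i h ih =>
    rw [pow2_natCast] at h
    refine ⟨ih.1, Or.inr ?_⟩
    rcases ih.2 with h2 | h2
    · rw [h2]; simpa using h
    · exact h2
  | case2 i h =>
    rw [pow2_natCast] at h
    exact ⟨by omega, Or.inl rfl⟩

-- while binarian_A > 0: idx = <inner loop>; result_list.append(idx-1); binarian_A -= pow2(idx-1)
def outerLoop (b : Int) (res : List Int) : List Int :=
  if 0 < b then
    let idx := findIdx b 0
    outerLoop (b - pow2 ((idx : Int) - 1)) (res ++ [(idx : Int) - 1])
  else res
termination_by b.toNat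
decreasing_by
  rename_i h
  obtain ⟨h1, h2⟩ := findIdx_spec b 0
  have hidx : 1 ≤ findIdx b 0 := by
    by_contra hc
    push_neg at hc
    interval_cases hi : findIdx b 0 <;> simp_all <;> omega
  rcases h2 with h2 | h2
  · omega
  · have hcast : ((findIdx b 0 : Int) - 1) = ((findIdx b 0 - 1 : Nat) : Int) := by omega
    rw [hcast, pow2_natCast]
    have hpos : (0:Int) < 2 ^ (findIdx b 0 - 1) := by positivity
    omega

def solution (A : List Int) : Int :=
  let binarian := (PySem.List.pyRange 0 (A.length : Int) 1).foldl
      (fun acc j => acc + pow2 (PySem.List.pyGetD A j 0)) 0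
  ((outerLoop binarian []).length : Int)

-- ===== PORT B =====
-- bin(s).count('1'): count of ones in the binary digits of s (s ≥ 0 under Pre_), ported
-- by hand as the standard binary-digit recursion (exact for nonnegative s)
def popCnt (n : Nat) : Nat := if n = 0 then 0 else n % 2 + popCnt (n / 2)

-- s = 0; for a in A: s += 1 << a   (1 << a = 2^a, exact for 0 ≤ a, guaranteed by Pre_)
def solution_alt (A : List Int) : Int :=
  let s := A.foldl (fun s a => s + 2 ^ a.toNat) (0 : Int)
  ((popCnt s.toNat : Nat) : Int)

-- ===== PRECONDITION & SPEC =====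
-- Pre_ excludes lists containing a negative entry: there B's '1 << a' raises ValueError,
-- while A's pow2 accidentally returns 1 (range of a negative int is empty).
def Pre_solution (A : List Int) : Prop := ∀ a ∈ A, 0 ≤ a
instance (A : List Int) : Decidable (Pre_solution A) := by unfold Pre_solution; infer_instance

def pvWitness_solution : List Int := [0, 3, 2, 3]

def Spec_solution (A : List Int) (out : Int) : Prop := out = solution_alt A
instance (A : List Int) (out : Int) : Decidable (Spec_solution A out) := by unfold Spec_solution; infer_instance

-- ===== CLAIM (what is proved, stated in full; the proofs are below) =====
def Claim_equal_solution : Prop := ∀ (A : List Int), Dom_solution A → Pre_solution A → Spec_solution A (solution A)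

-- ===== LEMMAS AND PROOFS =====

theorem popCnt_step (m : Nat) : popCnt m = m % 2 + popCnt (m / 2) := by
  by_cases h : m = 0
  · subst h; rw [popCnt]; simp [popCnt]
  · rw [popCnt]; simp [h]

-- removing the top set bit removes exactly one 1 from the binary representation
theorem popCnt_top (k : Nat) : ∀ n, 2 ^ k ≤ n → n < 2 ^ (k + 1) →
    popCnt n = popCnt (n - 2 ^ k) + 1 := by
  induction k with
  | zero =>
    intro n h1 h2
    have : n = 1 := by omega
    subst this
    simp [popCnt]
  | succ k ih =>
    intro n h1 h2
    have hp : 0 < 2 ^ k := by positivity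
    have e1 : 2 ^ (k + 1) = 2 * 2 ^ k := by ring
    have e2 : 2 ^ (k + 2) = 4 * 2 ^ k := by ring
    rw [e1] at h1
    rw [show k + 1 + 1 = k + 2 from rfl, e2] at h2
    have hd1 : 2 ^ k ≤ n / 2 := by omega
    have hd2 : n / 2 < 2 ^ (k + 1) := by rw [e1]; omega
    rw [popCnt_step n, ih (n / 2) hd1 hd2, popCnt_step (n - 2 ^ (k+1))]
    rw [e1]
    have hm : (n - 2 * 2 ^ k) % 2 = n % 2 := by omega
    have hdv : (n - 2 * 2 ^ k) / 2 = n / 2 - 2 ^ k := by omega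
    rw [hm, hdv]
    omega

theorem outerLoop_popCnt : ∀ (fuel : Nat) (b : Int) (res : List Int), b.toNat ≤ fuel → 0 ≤ b →
    (outerLoop b res).length = res.length + popCnt b.toNat := by
  intro fuel
  induction fuel with
  | zero =>
    intro b res hf hb
    have hb0 : b = 0 := by omega
    subst hb0
    rw [outerLoop]
    simp [popCnt]
  | succ f ih =>
    intro b res hf hb
    by_cases hpos : 0 < b
    · obtain ⟨h1, h2⟩ := findIdx_spec b 0
      have hidx : 1 ≤ findIdx b 0 := by
        by_contra hc
        push_neg at hc
        interval_cases hi : findIdx b 0 <;> simp_all <;> omega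
      have h2' : (2:Int) ^ (findIdx b 0 - 1) ≤ b := by
        rcases h2 with h | h
        · omega
        · exact h
      set k := findIdx b 0 - 1 with hk
      have hcast : ((findIdx b 0 : Int) - 1) = ((k : Nat) : Int) := by omega
      have hkp : findIdx b 0 = k + 1 := by omega
      have hub : b < 2 ^ (k + 1) := by rw [← hkp]; exact h1
      have hppos : (0:Int) < 2 ^ k := by positivity
      rw [outerLoop]
      simp only [hpos, if_pos]
      rw [hcast, pow2_natCast]
      have hrec := ih (b - 2 ^ k) (res ++ [((k : Nat) : Int)]) (by omega) (by omega)
      rw [hrec]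
      simp only [List.length_append, List.length_cons, List.length_nil]
      have hN1 : (b - 2 ^ k).toNat = b.toNat - 2 ^ k := by
        have : ((2:Int) ^ k) = ((2 ^ k : Nat) : Int) := by push_cast; ring
        omega
      have hN2 : 2 ^ k ≤ b.toNat := by
        have : ((2:Int) ^ k) = ((2 ^ k : Nat) : Int) := by push_cast; ring
        omega
      have hN3 : b.toNat < 2 ^ (k + 1) := by
        have : ((2:Int) ^ (k+1)) = ((2 ^ (k+1) : Nat) : Int) := by push_cast; ring
        omega
      rw [hN1, popCnt_top k b.toNat hN2 hN3]
      omega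
    · rw [outerLoop]
      simp only [hpos, if_neg, not_false_iff]
      have : b = 0 := by omega
      subst this
      simp [popCnt]

theorem foldl_sum_eq (A : List Int) (h : ∀ a ∈ A, 0 ≤ a) (c : Int) :
    A.foldl (fun acc a => acc + pow2 a) c = A.foldl (fun s a => s + 2 ^ a.toNat) c := by
  induction A generalizing c with
  | nil => rfl
  | cons x xs ih =>
    have hx : 0 ≤ x := h x List.mem_cons_self
    have : pow2 x = 2 ^ x.toNat := by
      rw [show x = (x.toNat : Int) from by omega, pow2_natCast, Int.toNat_natCast]
    simp only [List.foldl_cons, this]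
    exact ih (fun a ha => h a (List.mem_cons_of_mem _ ha)) _

theorem foldl_sum_nonneg (A : List Int) (c : Int) (hc : 0 ≤ c) :
    0 ≤ A.foldl (fun s a => s + 2 ^ a.toNat) c := by
  induction A generalizing c with
  | nil => simpa
  | cons x xs ih =>
    simp only [List.foldl_cons]
    exact ih _ (by positivity)

-- ===== VERDICT (by name: the statement is the Claim_ definition above) =====
theorem solution_spec : Claim_equal_solution := by
  intro A _ hpre
  unfold Spec_solution solution solution_alt
  show ((outerLoop ((PySem.List.pyRange 0 (A.length : Int) 1).foldl
      (fun acc j => acc + pow2 (PySem.List.pyGetD A j 0)) 0) []).length : Int)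
      = ((popCnt (A.foldl (fun s a => s + 2 ^ a.toNat) (0 : Int)).toNat : Nat) : Int)
  rw [PySem.List.foldl_pyRange_zero_pyGetD' A 0 (fun acc a => acc + pow2 a) 0]
  rw [foldl_sum_eq A hpre 0]
  have key := outerLoop_popCnt (A.foldl (fun s a => s + 2 ^ a.toNat) (0 : Int)).toNat
      (A.foldl (fun s a => s + 2 ^ a.toNat) (0 : Int)) [] le_rfl (foldl_sum_nonneg A 0 le_rfl)
  simp only [List.length_nil, Nat.zero_add] at key
  rw [key]
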